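-- pv_equiv track=rewrite | github.com/jardinr/ffi-crypto-news-bot | ffi-crypto-news-bot-main/ffi_crypto_bot.py | calculate_market_impact_score
-- ===== SOURCE A (Python) =====
-- def calculate_market_impact_score(title: str, description: str) -> int:
--     """Calculate market impact score (1-5) - Module 8 feature."""
--     text = f"{title} {description}".lower()
--
--     # High impact keywords (score 5)
--     high_impact = ['sec', 'regulation', 'ban', 'approval', 'etf', 'lawsuit',
--                    'hack', 'exploit', 'breach', 'shutdown', 'halving', 'merge']
--
--     # Medium-high impact (score 4)
--     medium_high = ['blackrock', 'fidelity', 'institutional', 'adoption',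
--                    'partnership', 'integration', 'upgrade', 'fork']
--
--     # Medium impact (score 3)
--     medium = ['binance', 'coinbase', 'exchange', 'trading', 'volume',
--               'price', 'market cap', 'whale']
--
--     if any(keyword in text for keyword in high_impact):
--         return 5
--     elif any(keyword in text for keyword in medium_high):
--         return 4
--     elif any(keyword in text for keyword in medium):
--         return 3
--     else:
--         return 2
-- ===== SOURCE B (Python) =====
-- # One flat keyword->score table and a single max-accumulating pass, instead of
-- # three ordered any()-cascades; scores 5>4>3 preserve the original priority.
-- _IMPACT_TABLE = [
--     ('sec', 5), ('regulation', 5), ('ban', 5), ('approval', 5), ('etf', 5),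
--     ('lawsuit', 5), ('hack', 5), ('exploit', 5), ('breach', 5),
--     ('shutdown', 5), ('halving', 5), ('merge', 5),
--     ('blackrock', 4), ('fidelity', 4), ('institutional', 4), ('adoption', 4),
--     ('partnership', 4), ('integration', 4), ('upgrade', 4), ('fork', 4),
--     ('binance', 3), ('coinbase', 3), ('exchange', 3), ('trading', 3),
--     ('volume', 3), ('price', 3), ('market cap', 3), ('whale', 3),
-- ]
--
-- def calculate_market_impact_score(title: str, description: str) -> int:
--     """Calculate market impact score (1-5) - Module 8 feature."""
--     text = f"{title} {description}".lower()
--     score = 2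
--     for keyword, tier in _IMPACT_TABLE:
--         if keyword in text and tier > score:
--             score = tier
--     return score
-- ===== Notes on version B (the rewrite author's own statement) =====
-- stated objective: simpler
-- what changed: Replaces the three ordered any()-cascade branches returning 5/4/3/2 with one flat (keyword, score) table and a single max-accumulating pass whose default is 2.
import Mathlib
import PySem

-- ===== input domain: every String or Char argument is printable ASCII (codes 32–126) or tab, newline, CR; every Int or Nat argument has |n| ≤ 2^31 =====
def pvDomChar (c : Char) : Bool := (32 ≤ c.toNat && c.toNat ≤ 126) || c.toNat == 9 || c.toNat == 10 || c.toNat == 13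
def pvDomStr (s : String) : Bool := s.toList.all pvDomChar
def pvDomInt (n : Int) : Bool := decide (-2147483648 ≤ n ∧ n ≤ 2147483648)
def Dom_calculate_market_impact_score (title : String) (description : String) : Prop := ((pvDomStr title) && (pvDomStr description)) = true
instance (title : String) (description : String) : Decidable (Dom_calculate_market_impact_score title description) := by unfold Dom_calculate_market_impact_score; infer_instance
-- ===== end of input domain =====

-- B replaces A's three ordered any()-cascade branches with one flat (keyword, score)
-- table and a single max-accumulating pass (objective: simpler).

-- ===== PORT A =====
def pvHighImpact : List String :=
  ["sec", "regulation", "ban", "approval", "etf", "lawsuit",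
   "hack", "exploit", "breach", "shutdown", "halving", "merge"]

def pvMediumHigh : List String :=
  ["blackrock", "fidelity", "institutional", "adoption",
   "partnership", "integration", "upgrade", "fork"]

def pvMedium : List String :=
  ["binance", "coinbase", "exchange", "trading", "volume",
   "price", "market cap", "whale"]

def calculate_market_impact_score (title : String) (description : String) : Int :=
  -- text = f"{title} {description}".lower()  (built on List Char, PySem-exact)
  let text := PySem.Chars.lower (title.toList ++ ' ' :: description.toList)
  if pvHighImpact.any (fun kw => PySem.Chars.isIn kw.toList text) then 5
  else if pvMediumHigh.any (fun kw => PySem.Chars.isIn kw.toList text) then 4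
  else if pvMedium.any (fun kw => PySem.Chars.isIn kw.toList text) then 3
  else 2

-- ===== PORT B =====
def pvImpactTable : List (String × Int) :=
  [("sec", 5), ("regulation", 5), ("ban", 5), ("approval", 5), ("etf", 5),
   ("lawsuit", 5), ("hack", 5), ("exploit", 5), ("breach", 5),
   ("shutdown", 5), ("halving", 5), ("merge", 5),
   ("blackrock", 4), ("fidelity", 4), ("institutional", 4), ("adoption", 4),
   ("partnership", 4), ("integration", 4), ("upgrade", 4), ("fork", 4),
   ("binance", 3), ("coinbase", 3), ("exchange", 3), ("trading", 3),
   ("volume", 3), ("price", 3), ("market cap", 3), ("whale", 3)]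

def calculate_market_impact_score_alt (title : String) (description : String) : Int :=
  let text := PySem.Chars.lower (title.toList ++ ' ' :: description.toList)
  -- score = 2; for keyword, tier in table: if keyword in text and tier > score: score = tier
  pvImpactTable.foldl
    (fun score p => if PySem.Chars.isIn p.1.toList text && decide (p.2 > score) then p.2 else score)
    2

-- ===== PRECONDITION & SPEC =====
def Spec_calculate_market_impact_score (title : String) (description : String) (out : Int) : Prop := out = calculate_market_impact_score_alt title description
instance (title : String) (description : String) (out : Int) : Decidable (Spec_calculate_market_impact_score title description out) := by unfold Spec_calculate_market_impact_score; infer_instance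

-- ===== CLAIM (what is proved, stated in full; the proofs are below) =====
def Claim_equal_calculate_market_impact_score : Prop := ∀ (title : String) (description : String), Dom_calculate_market_impact_score title description → Spec_calculate_market_impact_score title description (calculate_market_impact_score title description)

-- ===== LEMMAS AND PROOFS =====

-- B's fold over a constant-score block of keywords is 'raise score to c if any keyword hits'.
theorem pv_fold_const_block (text : List Char) (c acc : Int) (kws : List String) :
    kws.foldl
      (fun score kw => if PySem.Chars.isIn kw.toList text && decide (c > score) then c else score)
      acc
      = if kws.any (fun kw => PySem.Chars.isIn kw.toList text) && decide (c > acc) then c else acc := by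
  induction kws generalizing acc with
  | nil => simp
  | cons k ks ih =>
    simp only [List.foldl_cons, List.any_cons, ih]
    by_cases hk : PySem.Chars.isIn k.toList text = true <;>
      by_cases hc : c > acc <;>
      simp [hk, hc]

theorem pv_fold_block_map (text : List Char) (c acc : Int) (kws : List String) :
    (kws.map (fun k => (k, c))).foldl
      (fun score p => if PySem.Chars.isIn p.1.toList text && decide (p.2 > score) then p.2 else score)
      acc
      = if kws.any (fun kw => PySem.Chars.isIn kw.toList text) && decide (c > acc) then c else acc := by
  rw [List.foldl_map]
  exact pv_fold_const_block text c acc kws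

theorem pv_table_split :
    pvImpactTable = pvHighImpact.map (fun k => (k, (5 : Int)))
      ++ pvMediumHigh.map (fun k => (k, (4 : Int)))
      ++ pvMedium.map (fun k => (k, (3 : Int))) := rfl

-- ===== VERDICT (by name: the statement is the Claim_ definition above) =====
theorem calculate_market_impact_score_spec : Claim_equal_calculate_market_impact_score := by
  intro title description _
  unfold Spec_calculate_market_impact_score
  unfold calculate_market_impact_score calculate_market_impact_score_alt
  rw [pv_table_split]
  simp only [List.foldl_append, pv_fold_block_map]
  by_cases h5 : pvHighImpact.any (fun kw => PySem.Chars.isIn kw.toList (PySem.Chars.lower (title.toList ++ ' ' :: description.toList))) = true <;>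
  by_cases h4 : pvMediumHigh.any (fun kw => PySem.Chars.isIn kw.toList (PySem.Chars.lower (title.toList ++ ' ' :: description.toList))) = true <;>
  by_cases h3 : pvMedium.any (fun kw => PySem.Chars.isIn kw.toList (PySem.Chars.lower (title.toList ++ ' ' :: description.toList))) = true <;>
  simp [h5, h4, h3]
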